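-- pv_equiv track=rewrite | github.com/MeaninGood/gajimuchim | Day_6_0706-0708/G4_2661.py | check
-- ===== SOURCE A (Python) =====
-- def check(arr, m):              # 좋은 수열인지 체크하는 함수
--     idx = 1
--     while idx <= m // 2:        # 1개 간격, 2개 간격, 3개 간격으로 다 확인해보기
--         for i in range(idx, m):
--             if arr[i - idx:i] == arr[i:i + idx]:
--                 return False
--
--         idx += 1
--
--     return True
-- ===== SOURCE B (Python) =====
-- def check(arr, m):
--     n = len(arr)
--     for idx in range(1, m // 2 + 1):
--         run = 0
--         for u in range(m - 1):
--             if u + idx < n and arr[u] == arr[u + idx]: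
--                 run += 1
--                 if run >= idx:
--                     return False
--             else:
--                 run = 0
--     return True
-- ===== Notes on version B (the rewrite author's own statement) =====
-- stated objective: alternative
-- what changed: Replaces A's slice-comparison triple loop by a per-gap run-length scan: for each gap idx it counts consecutive positions u with arr[u]==arr[u+idx] and reports a repeated adjacent block as soon as a run reaches idx (no slice building or slice comparison); Pre_ excludes inputs with m > len(arr)+1, an out-of-contract corner (m is meant to be the sequence length) where A's slices read past the array and clamp to empty, so either answer is defensible.
-- outside the precondition, e.g. on check([], 2): A returns False, B returns True; on check([1], 3): A returns False, B returns True; on check([5, 5], 4): A returns False, B returns False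
import Mathlib
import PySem

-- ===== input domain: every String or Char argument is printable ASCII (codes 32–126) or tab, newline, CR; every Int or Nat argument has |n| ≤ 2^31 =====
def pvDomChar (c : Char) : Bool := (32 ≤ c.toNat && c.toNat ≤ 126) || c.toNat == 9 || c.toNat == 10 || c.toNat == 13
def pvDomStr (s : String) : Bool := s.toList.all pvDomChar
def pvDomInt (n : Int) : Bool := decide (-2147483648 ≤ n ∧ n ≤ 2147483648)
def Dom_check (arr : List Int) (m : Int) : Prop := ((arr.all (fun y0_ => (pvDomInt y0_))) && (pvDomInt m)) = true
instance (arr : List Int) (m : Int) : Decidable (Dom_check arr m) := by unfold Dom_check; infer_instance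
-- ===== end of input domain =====

-- B replaces A's slice-comparison triple loop by a per-gap run-length scan (a different algorithm, not measured faster); equality is proved for m ≤ len(arr)+1 (Pre_).

-- ===== PORT A =====
-- the inner 'for i in range(idx, m)' loop (lazy like Python's range: early 'return False' = true);
-- fuel (m - idx).toNat counts the remaining iterations
def checkFor (arr : List Int) (m idx i : Int) : Nat → Bool
  | 0 => false
  | fuel + 1 =>
    if i < m then
      if PySem.List.slice arr (some (i - idx)) (some i)
           == PySem.List.slice arr (some i) (some (i + idx))
      then true
      else checkFor arr m idx (i + 1) fuel
    else false

-- the while loop: idx counts 1,2,… while idx ≤ m//2; fuel (m//2).toNat bounds the iterations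
def checkWhile (arr : List Int) (m : Int) (idx : Int) : Nat → Bool
  | 0 => true
  | fuel + 1 =>
    if idx ≤ PySem.Int.floordiv m 2 then
      if checkFor arr m idx idx (m - idx).toNat
      then false
      else checkWhile arr m (idx + 1) fuel
    else true

def check (arr : List Int) (m : Int) : Bool :=
  checkWhile arr m 1 (PySem.Int.floordiv m 2).toNat

-- ===== PORT B =====
-- inner 'for u in range(m - 1)' loop of B, carrying the current run of matched pairs; true = found a repeated block (return False).
-- Source B's condition guards 'u + idx < n' before indexing, so both accesses are in range: pyGetD is exact here.
def altInner (arr : List Int) (n idx : Int) : Int → List Int → Bool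
  | _, [] => false
  | run, u :: us =>
    if (decide (u + idx < n)) && (PySem.List.pyGetD arr u 0 == PySem.List.pyGetD arr (u + idx) 0) then
      if idx ≤ run + 1 then true else altInner arr n idx (run + 1) us
    else altInner arr n idx 0 us

def check_alt (arr : List Int) (m : Int) : Bool :=
  let n : Int := arr.length
  !((PySem.List.pyRange 1 (PySem.Int.floordiv m 2 + 1) 1).any (fun idx =>
      altInner arr n idx 0 (PySem.List.pyRange 0 (m - 1) 1)))

-- ===== PRECONDITION & SPEC =====
-- Pre_ excludes inputs with m > len(arr)+1 (A still returns there): m is meant to be the length of the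
-- sequence, and past len(arr)+1 A's slices read beyond the array and clamp to empty, so either answer is
-- a defensible choice on an out-of-contract corner (A returns False from comparing two empty slices, B True).
def Pre_check (arr : List Int) (m : Int) : Prop := m ≤ (arr.length : Int) + 1
instance (arr : List Int) (m : Int) : Decidable (Pre_check arr m) := by unfold Pre_check; infer_instance
def pvWitness_check : List Int × Int := ([1, 2, 3], 3)

def Spec_check (arr : List Int) (m : Int) (out : Bool) : Prop := out = check_alt arr m
instance (arr : List Int) (m : Int) (out : Bool) : Decidable (Spec_check arr m out) := by unfold Spec_check; infer_instance

-- ===== CLAIM (what is proved, stated in full; the proofs are below) =====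
def Claim_equal_check : Prop := ∀ (arr : List Int) (m : Int), Dom_check arr m → Pre_check arr m → Spec_check arr m (check arr m)

-- ===== LEMMAS AND PROOFS =====

-- G arr idx u : position u matches position u+idx (the per-gap match predicate both sides reduce to)
def G (arr : List Int) (idx u : Int) : Prop :=
  PySem.List.pyGetD arr u 0 = PySem.List.pyGetD arr (u + idx) 0

-- the guarded condition of B's inner loop
def C (arr : List Int) (n idx u : Int) : Prop := u + idx < n ∧ G arr idx u

-- the inner condition of A's loop
def AHit (arr : List Int) (idx i : Int) : Prop :=
  PySem.List.slice arr (some (i - idx)) (some i) = PySem.List.slice arr (some i) (some (i + idx))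

-- ---- A-side characterization ----

lemma checkFor_iff (arr : List Int) (m idx : Int) :
    ∀ (fuel : Nat) (i0 : Int), (m - i0).toNat ≤ fuel →
      (checkFor arr m idx i0 fuel = true ↔ ∃ i, i0 ≤ i ∧ i < m ∧ AHit arr idx i) := by
  intro fuel
  induction fuel with
  | zero =>
    intro i0 hf
    simp only [checkFor]
    constructor
    · intro h; exact absurd h (by simp)
    · rintro ⟨i, h1, h2, _⟩; omega
  | succ fuel ih =>
    intro i0 hf
    simp only [checkFor]
    by_cases hlt : i0 < m
    · rw [if_pos hlt]
      by_cases hhit : AHit arr idx i0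
      · rw [if_pos (by simpa [AHit] using (beq_iff_eq.mpr hhit))]
        simp only [true_iff]
        exact ⟨i0, le_refl _, hlt, hhit⟩
      · rw [if_neg (by simpa [AHit] using hhit)]
        rw [ih (i0 + 1) (by omega)]
        constructor
        · rintro ⟨i, h1, h2, h3⟩; exact ⟨i, by omega, h2, h3⟩
        · rintro ⟨i, h1, h2, h3⟩
          refine ⟨i, ?_, h2, h3⟩
          rcases eq_or_lt_of_le h1 with heq | hl2
          · exfalso; subst heq; exact hhit h3
          · omega
    · rw [if_neg hlt]
      constructor
      · intro h; exact absurd h (by simp)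
      · rintro ⟨i, h1, h2, _⟩; omega

lemma checkWhile_iff (arr : List Int) (m : Int) :
    ∀ (fuel : Nat) (idx0 : Int),
      (PySem.Int.floordiv m 2 + 1 - idx0).toNat ≤ fuel →
      (checkWhile arr m idx0 fuel = false ↔
        ∃ idx, idx0 ≤ idx ∧ idx ≤ PySem.Int.floordiv m 2 ∧ ∃ i, idx ≤ i ∧ i < m ∧ AHit arr idx i) := by
  intro fuel
  induction fuel with
  | zero =>
    intro idx0 hf
    simp only [checkWhile]
    constructor
    · intro h; exact absurd h (by simp)
    · rintro ⟨idx, h1, h2, _⟩; omega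
  | succ fuel ih =>
    intro idx0 hf
    simp only [checkWhile]
    by_cases hle : idx0 ≤ PySem.Int.floordiv m 2
    · rw [if_pos hle]
      cases hany : checkFor arr m idx0 idx0 (m - idx0).toNat with
      | true =>
        constructor
        · intro _
          obtain ⟨i, h1, h2, h3⟩ := (checkFor_iff arr m idx0 _ idx0 (le_refl _)).mp hany
          exact ⟨idx0, le_refl _, hle, i, h1, h2, h3⟩
        · intro _; rfl
      | false =>
        simp only [Bool.false_eq_true, if_false]
        rw [ih (idx0 + 1) (by omega)]
        constructor
        · rintro ⟨idx, h1, h2, hrest⟩; exact ⟨idx, by omega, h2, hrest⟩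
        · rintro ⟨idx, h1, h2, hrest⟩
          refine ⟨idx, ?_, h2, hrest⟩
          rcases eq_or_lt_of_le h1 with heq | hlt
          · exfalso
            have : checkFor arr m idx0 idx0 (m - idx0).toNat = true := by
              apply (checkFor_iff arr m idx0 _ idx0 (le_refl _)).mpr
              subst heq; exact hrest
            rw [hany] at this; exact absurd this (by simp)
          · omega
    · rw [if_neg hle]
      constructor
      · intro h; exact absurd h (by simp)
      · rintro ⟨idx, h1, h2, _⟩; omega

lemma check_iff (arr : List Int) (m : Int) :
    check arr m = false ↔
      ∃ idx, 1 ≤ idx ∧ idx ≤ PySem.Int.floordiv m 2 ∧ ∃ i, idx ≤ i ∧ i < m ∧ AHit arr idx i := by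
  unfold check
  exact checkWhile_iff arr m _ 1 (by omega)

-- ---- slice-equality characterization ----

lemma take_drop_eq_iff (arr : List Int) (d b : Nat) (hdb : d ≤ b) (hd : 1 ≤ d) :
    ((arr.drop (b - d)).take d = (arr.drop b).take d) ↔
      ((b + d ≤ arr.length ∧ ∀ k < d, arr[b - d + k]? = arr[b + k]?)
        ∨ arr.length + d ≤ b) := by
  by_cases h : arr.length + d ≤ b
  · have e1 : arr.drop (b - d) = [] := List.drop_eq_nil_of_le (by omega)
    have e2 : arr.drop b = [] := List.drop_eq_nil_of_le (by omega)
    simp [e1, e2, h]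
  · by_cases h2 : b + d ≤ arr.length
    · constructor
      · intro hEq
        left
        refine ⟨h2, fun k hk => ?_⟩
        have := congrArg (fun l => l[k]?) hEq
        simpa [List.getElem?_take, List.getElem?_drop, hk] using this
      · rintro (⟨_, hElem⟩ | hbad)
        · apply List.ext_getElem?
          intro k
          by_cases hk : k < d
          · simpa [List.getElem?_take, List.getElem?_drop, hk] using hElem k hk
          · simp [hk]
        · omega
    · constructor
      · intro hEq
        exfalso
        have hlen := congrArg List.length hEq
        simp only [List.length_take, List.length_drop] at hlen
        omega
      · rintro (⟨hbad, _⟩ | hbad) <;> omega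

lemma AHit_iff (arr : List Int) (idx i : Int) (h1 : 1 ≤ idx) (h2 : idx ≤ i) :
    AHit arr idx i ↔
      ((i + idx ≤ (arr.length : Int) ∧ ∀ u, i - idx ≤ u → u < i → G arr idx u)
        ∨ (arr.length : Int) + idx ≤ i) := by
  unfold AHit
  rw [PySem.List.slice_toNat arr (by omega) (by omega), PySem.List.slice_toNat arr (by omega) (by omega)]
  have e1 : (i - idx).toNat = i.toNat - idx.toNat := by omega
  have e2 : i.toNat - (i.toNat - idx.toNat) = idx.toNat := by omega
  have e3 : (i + idx).toNat - i.toNat = idx.toNat := by omega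
  rw [e1, e2, e3]
  rw [take_drop_eq_iff arr idx.toNat i.toNat (by omega) (by omega)]
  constructor
  · rintro (⟨hlen, hElem⟩ | hbad)
    · left
      refine ⟨by omega, fun u hu1 hu2 => ?_⟩
      have hk : (u - (i - idx)).toNat < idx.toNat := by omega
      have := hElem _ hk
      have eu1 : i.toNat - idx.toNat + (u - (i - idx)).toNat = u.toNat := by omega
      have eu2 : i.toNat + (u - (i - idx)).toNat = (u + idx).toNat := by omega
      rw [eu1, eu2] at this
      unfold G
      rw [PySem.List.pyGetD_eq_getElem arr 0 (by omega) (by omega),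
          PySem.List.pyGetD_eq_getElem arr 0 (by omega) (by omega)]
      have b1 : u.toNat < arr.length := by omega
      have b2 : (u + idx).toNat < arr.length := by omega
      rw [List.getElem?_eq_getElem b1, List.getElem?_eq_getElem b2] at this
      exact Option.some.inj this
    · right; omega
  · rintro (⟨hlen, hG⟩ | hbad)
    · left
      refine ⟨by omega, fun k hk => ?_⟩
      have hu := hG (i - idx + k) (by omega) (by omega)
      unfold G at hu
      rw [PySem.List.pyGetD_eq_getElem arr 0 (by omega) (by omega),
          PySem.List.pyGetD_eq_getElem arr 0 (by omega) (by omega)] at hu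
      have eu1 : i.toNat - idx.toNat + k = (i - idx + k).toNat := by omega
      have eu2 : i.toNat + k = (i - idx + k + idx).toNat := by omega
      rw [eu1, eu2, List.getElem?_eq_getElem (by omega), List.getElem?_eq_getElem (by omega)]
      exact congrArg some hu
    · right; omega

-- ---- B-side characterization ----

lemma altInner_iff (arr : List Int) (n idx hi : Int) :
    ∀ (N : Nat) (s run : Int), (hi - s).toNat = N → 0 ≤ run → run ≤ s → run < idx →
      (∀ u, s - run ≤ u → u < s → C arr n idx u) →
      (run = s ∨ ¬ C arr n idx (s - run - 1)) →
      (altInner arr n idx run (PySem.List.pyRange s hi 1) = true ↔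
        ∃ t, s ≤ t ∧ t < hi ∧ idx ≤ t + 1 ∧ ∀ u, t - idx < u → u ≤ t → C arr n idx u) := by
  intro N
  induction N with
  | zero =>
    intro s run hN _ _ _ _ _
    rw [PySem.List.pyRange_one_eq_nil (by omega)]
    simp only [altInner]
    constructor
    · intro h; exact absurd h (by simp)
    · rintro ⟨t, h1, h2, _⟩; omega
  | succ N ih =>
    intro s run hN hrun0 hruns hridx HG HM
    rw [PySem.List.pyRange_one_cons (by omega)]
    simp only [altInner]
    by_cases hg : C arr n idx s
    · rw [if_pos (by simpa [C, G] using hg)]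
      by_cases hfull : idx ≤ run + 1
      · rw [if_pos hfull]
        constructor
        · intro _
          refine ⟨s, le_refl _, by omega, by omega, fun u hu1 hu2 => ?_⟩
          rcases eq_or_lt_of_le hu2 with heq | hlt
          · subst heq; exact hg
          · exact HG u (by omega) hlt
        · intro _; rfl
      · rw [if_neg hfull]
        rw [ih (s + 1) (run + 1) (by omega) (by omega) (by omega) (by omega)
              (fun u hu1 hu2 => by
                rcases eq_or_lt_of_le (show u ≤ s by omega) with heq | hlt
                · subst heq; exact hg
                · exact HG u (by omega) hlt)
              (by rcases HM with h | h
                  · left; omega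
                  · right; simpa [show s + 1 - (run + 1) - 1 = s - run - 1 by ring] using h)]
        constructor
        · rintro ⟨t, h1, h2, h3, h4⟩; exact ⟨t, by omega, h2, h3, h4⟩
        · rintro ⟨t, h1, h2, h3, h4⟩
          refine ⟨t, ?_, h2, h3, h4⟩
          rcases eq_or_lt_of_le h1 with heq | hlt
          · exfalso
            rcases HM with h | h
            · omega
            · exact h (h4 (s - run - 1) (by omega) (by omega))
          · omega
    · rw [if_neg (by simpa [C, G] using hg)]
      rw [ih (s + 1) 0 (by omega) (by omega) (by omega) (by omega)
            (fun u hu1 hu2 => by omega)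
            (by right; simpa using hg)]
      constructor
      · rintro ⟨t, h1, h2, h3, h4⟩; exact ⟨t, by omega, h2, h3, h4⟩
      · rintro ⟨t, h1, h2, h3, h4⟩
        refine ⟨t, ?_, h2, h3, h4⟩
        rcases eq_or_lt_of_le h1 with heq | hlt
        · exfalso; exact hg (h4 s (by omega) (by omega))
        · omega

lemma checkAlt_iff (arr : List Int) (m : Int) :
    check_alt arr m = false ↔
      ∃ idx, 1 ≤ idx ∧ idx ≤ PySem.Int.floordiv m 2 ∧
        ∃ t, 0 ≤ t ∧ t < m - 1 ∧ idx ≤ t + 1 ∧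
          ∀ u, t - idx < u → u ≤ t → C arr (arr.length : Int) idx u := by
  unfold check_alt
  simp only [Bool.not_eq_false', List.any_eq_true]
  constructor
  · rintro ⟨idx, hmem, hin⟩
    rw [PySem.List.mem_pyRange_one] at hmem
    refine ⟨idx, hmem.1, by omega, ?_⟩
    exact ((altInner_iff arr (arr.length : Int) idx (m - 1)
      (m - 1 - 0).toNat 0 0 (by omega) (le_refl _)
      (le_refl _) (by omega) (fun u h1 h2 => absurd h2 (by omega)) (Or.inl rfl)).mp hin)
  · rintro ⟨idx, h1, h2, hex⟩
    refine ⟨idx, by rw [PySem.List.mem_pyRange_one]; omega, ?_⟩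
    exact ((altInner_iff arr (arr.length : Int) idx (m - 1)
      (m - 1 - 0).toNat 0 0 (by omega) (le_refl _)
      (le_refl _) (by omega) (fun u hx1 hx2 => absurd hx2 (by omega)) (Or.inl rfl)).mpr hex)

-- ---- bridge (uses Pre_: m ≤ len(arr)+1, so A's out-of-range empty-slice hits cannot occur) ----

lemma bridge (arr : List Int) (m : Int) (hpre : m ≤ (arr.length : Int) + 1) :
    (∃ idx, 1 ≤ idx ∧ idx ≤ PySem.Int.floordiv m 2 ∧ ∃ i, idx ≤ i ∧ i < m ∧ AHit arr idx i) ↔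
      ∃ idx, 1 ≤ idx ∧ idx ≤ PySem.Int.floordiv m 2 ∧
        ∃ t, 0 ≤ t ∧ t < m - 1 ∧ idx ≤ t + 1 ∧
          ∀ u, t - idx < u → u ≤ t → C arr (arr.length : Int) idx u := by
  constructor
  · rintro ⟨idx, h1, h2, i, hi1, hi2, hHit⟩
    rcases (AHit_iff arr idx i h1 hi1).mp hHit with ⟨hlen, hG⟩ | hbig
    · refine ⟨idx, h1, h2, i - 1, by omega, by omega, by omega, fun u hu1 hu2 => ?_⟩
      exact ⟨by omega, hG u (by omega) (by omega)⟩
    · omega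
  · rintro ⟨idx, h1, h2, t, ht0, ht1, ht2, hC⟩
    have hnext : t + idx < (arr.length : Int) := (hC t (by omega) (le_refl _)).1
    refine ⟨idx, h1, h2, t + 1, by omega, by omega, ?_⟩
    refine (AHit_iff arr idx (t + 1) h1 (by omega)).mpr (Or.inl ⟨by omega, fun u hu1 hu2 => ?_⟩)
    exact (hC u (by omega) (by omega)).2

-- ===== VERDICT (by name: the statement is the Claim_ definition above) =====
theorem check_spec : Claim_equal_check := by
  intro arr m _ hpre
  unfold Spec_check
  have h : (check arr m = false) ↔ (check_alt arr m = false) :=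
    (check_iff arr m).trans ((bridge arr m hpre).trans (checkAlt_iff arr m).symm)
  cases h1 : check arr m <;> cases h2 : check_alt arr m <;> simp_all
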